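-- pv_equiv track=rewrite | github.com/ssr01357/pddlego-plus | interactive_Alfworld_brief.py | detect_duplicates
-- ===== SOURCE A (Python) =====
-- def detect_duplicates(action_lst, threshold):
--     n = len(action_lst)
--
--     for seq_len in range(1, n // 2 + 1):
--         # Get the last sequence of this length
--         sequence = action_lst[-seq_len:]
--
--         # Count how many times this sequence appears continuously at the end
--         count = 1
--         for i in range(2, threshold + 1):
--             if action_lst[-i * seq_len: - (i - 1) * seq_len] == sequence:
--                 count += 1
--             else:
--                 break
--
--         # If the sequence repeats at least 'threshold' times, return True
--         if count >= threshold: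
--             return True
--
--     # If no sequence repeats up to the threshold, return False
--     return False
-- ===== SOURCE B (Python) =====
-- def detect_duplicates(action_lst, threshold):
--     # A length-L block repeats `threshold` times at the end exactly when the
--     # tail of length threshold*L fits and equals that block repeated.
--     n = len(action_lst)
--     return any(threshold * L <= n and
--                action_lst[n - threshold * L:] == action_lst[n - L:] * threshold
--                for L in range(1, n // 2 + 1))
-- ===== Notes on version B (the rewrite author's own statement) =====
-- stated objective: faster
-- what changed: Replaces A's inner block-by-block counting loop (up to threshold slice comparisons per candidate length) with a single comparison per candidate length: the tail of length threshold*L is compared against the last block repeated threshold times.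
import Mathlib
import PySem

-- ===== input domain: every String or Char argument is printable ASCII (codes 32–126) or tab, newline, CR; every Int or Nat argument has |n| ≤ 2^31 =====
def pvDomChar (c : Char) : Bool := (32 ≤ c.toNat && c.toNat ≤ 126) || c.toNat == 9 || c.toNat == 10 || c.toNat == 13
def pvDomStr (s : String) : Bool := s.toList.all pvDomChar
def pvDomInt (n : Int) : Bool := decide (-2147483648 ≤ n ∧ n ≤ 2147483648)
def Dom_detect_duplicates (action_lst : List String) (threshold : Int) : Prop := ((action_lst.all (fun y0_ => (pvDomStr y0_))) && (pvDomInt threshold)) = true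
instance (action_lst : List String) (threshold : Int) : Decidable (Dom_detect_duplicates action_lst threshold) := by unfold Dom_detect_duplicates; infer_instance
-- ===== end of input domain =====

-- B replaces A's inner block-counting loop by one comparison per candidate
-- length (the tail of length threshold*L equals the last block repeated),
-- which a timing run measured as faster.


-- ===== PORT A =====
-- inner 'for i in range(2, threshold + 1): … else: break' with its running count
def pvCountLoop (pred : Int → Bool) (t : Int) (i : Int) (count : Int) : Int :=
  if _h : i < t + 1 then
    if pred i then pvCountLoop pred t (i + 1) (count + 1) else count
  else count
termination_by (t + 1 - i).toNat
decreasing_by omega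

def detect_duplicates (action_lst : List String) (threshold : Int) : Bool :=
  let n : Int := PySem.List.len action_lst
  (PySem.List.pyRange 1 (PySem.Int.floordiv n 2 + 1) 1).any (fun seq_len =>
    let sequence := PySem.List.slice action_lst (some (-seq_len)) none
    let count := pvCountLoop
      (fun i => PySem.List.slice action_lst (some (-(i * seq_len))) (some (-((i - 1) * seq_len))) == sequence)
      threshold 2 1
    decide (count ≥ threshold))

-- ===== PORT B =====
def detect_duplicates_alt (action_lst : List String) (threshold : Int) : Bool :=
  let n : Int := PySem.List.len action_lst
  (PySem.List.pyRange 1 (PySem.Int.floordiv n 2 + 1) 1).any (fun L =>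
    decide (threshold * L ≤ n) &&
      (PySem.List.slice action_lst (some (n - threshold * L)) none ==
        PySem.List.pyRepeat (PySem.List.slice action_lst (some (n - L)) none) threshold))

-- ===== PRECONDITION & SPEC =====
def Spec_detect_duplicates (action_lst : List String) (threshold : Int) (out : Bool) : Prop := out = detect_duplicates_alt action_lst threshold
instance (action_lst : List String) (threshold : Int) (out : Bool) : Decidable (Spec_detect_duplicates action_lst threshold out) := by unfold Spec_detect_duplicates; infer_instance

-- ===== CLAIM (what is proved, stated in full; the proofs are below) =====
def Claim_equal_detect_duplicates : Prop := ∀ (action_lst : List String) (threshold : Int), Dom_detect_duplicates action_lst threshold → Spec_detect_duplicates action_lst threshold (detect_duplicates action_lst threshold)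

-- ===== LEMMAS AND PROOFS =====

-- A's i-th trailing block, in Nat indices (what slice lst [-(m*ℓ):-((m-1)*ℓ)] computes)
def pvBlock (lst : List String) (m ℓ : Nat) : List String :=
  List.take ((lst.length - (m - 1) * ℓ) - (lst.length - m * ℓ)) (List.drop (lst.length - m * ℓ) lst)

theorem pvCountLoop_le (pred : Int → Bool) (t : Int) :
    ∀ (i c : Int), i ≤ t + 1 → pvCountLoop pred t i c ≤ c + (t + 1 - i) := by
  have key : ∀ (m : Nat) (i c : Int), (t + 1 - i).toNat = m → i ≤ t + 1 →
      pvCountLoop pred t i c ≤ c + (t + 1 - i) := by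
    intro m
    induction m using Nat.strong_induction_on with
    | _ m ih =>
      intro i c hm hi
      rw [pvCountLoop]
      split_ifs with h1 h2
      · have := ih (t + 1 - (i + 1)).toNat (by omega) (i + 1) (c + 1) rfl (by omega)
        omega
      · omega
      · omega
  exact fun i c hi => key (t + 1 - i).toNat i c rfl hi

theorem pvCountLoop_eq_iff (pred : Int → Bool) (t : Int) :
    ∀ (i c : Int), i ≤ t + 1 →
      (pvCountLoop pred t i c = c + (t + 1 - i) ↔ ∀ j, i ≤ j → j < t + 1 → pred j = true) := by
  have key : ∀ (m : Nat) (i c : Int), (t + 1 - i).toNat = m → i ≤ t + 1 →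
      (pvCountLoop pred t i c = c + (t + 1 - i) ↔ ∀ j, i ≤ j → j < t + 1 → pred j = true) := by
    intro m
    induction m using Nat.strong_induction_on with
    | _ m ih =>
      intro i c hm hi
      rw [pvCountLoop]
      split_ifs with h1 h2
      · have hrec := ih (t + 1 - (i + 1)).toNat (by omega) (i + 1) (c + 1) rfl (by omega)
        constructor
        · intro heq j hij hjt
          rcases eq_or_lt_of_le hij with rfl | hlt
          · exact h2
          · exact (hrec.mp (by omega)) j (by omega) hjt
        · intro hall
          rw [show c + (t + 1 - i) = (c + 1) + (t + 1 - (i + 1)) by ring]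
          exact hrec.mpr fun j hij hjt => hall j (by omega) hjt
      · constructor
        · intro heq; omega
        · intro hall
          have := hall i le_rfl h1
          rw [this] at h2; exact absurd rfl h2
      · constructor
        · intro _ j hij hjt; omega
        · intro _; omega
  exact fun i c hi => key (t + 1 - i).toNat i c rfl hi

-- tail of length k*ℓ equals the last block repeated k times ↔ all trailing blocks equal it
theorem pvRep_iff (lst : List String) (ℓ : Nat) (h1 : 1 ≤ ℓ) (hN : ℓ ≤ lst.length) :
    ∀ k, 1 ≤ k → k * ℓ ≤ lst.length →
      (List.drop (lst.length - k * ℓ) lst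
          = (List.replicate k (List.drop (lst.length - ℓ) lst)).flatten
        ↔ ∀ m, 2 ≤ m → m ≤ k → pvBlock lst m ℓ = List.drop (lst.length - ℓ) lst) := by
  intro k hk
  induction k, hk using Nat.le_induction with
  | base =>
    intro _
    simp only [one_mul, List.replicate_one, List.flatten_cons, List.flatten_nil, List.append_nil]
    constructor
    · intro _ m h2 hm1; omega
    · intro _; trivial
  | succ k hk ih =>
    intro hfit
    have hkl : (k + 1) * ℓ = k * ℓ + ℓ := Nat.succ_mul k ℓ
    have hfit' : k * ℓ ≤ lst.length := by omega
    have hsplit : List.drop (lst.length - (k + 1) * ℓ) lst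
        = (List.drop (lst.length - (k + 1) * ℓ) lst).take ℓ ++ List.drop (lst.length - k * ℓ) lst := by
      conv_lhs => rw [← List.take_append_drop ℓ (List.drop (lst.length - (k + 1) * ℓ) lst)]
      rw [List.drop_drop]
      congr 2
      omega
    have hlen1 : ((List.drop (lst.length - (k + 1) * ℓ) lst).take ℓ).length = ℓ := by
      simp only [List.length_take, List.length_drop]; omega
    have hlen2 : (List.drop (lst.length - ℓ) lst).length = ℓ := by
      simp only [List.length_drop]; omega
    have hblock : pvBlock lst (k + 1) ℓ = (List.drop (lst.length - (k + 1) * ℓ) lst).take ℓ := by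
      unfold pvBlock
      congr 1
      · simp only [Nat.add_sub_cancel]; omega
    rw [hsplit, List.replicate_succ, List.flatten_cons]
    constructor
    · intro heq m h2 hm
      obtain ⟨hfst, hsnd⟩ := List.append_inj heq (by rw [hlen1, hlen2])
      rcases Nat.eq_or_lt_of_le hm with rfl | hlt
      · rw [hblock]; exact hfst
      · exact (ih hfit').mp hsnd m h2 (by omega)
    · intro hall
      have hfst : (List.drop (lst.length - (k + 1) * ℓ) lst).take ℓ = List.drop (lst.length - ℓ) lst := by
        rw [← hblock]; exact hall (k + 1) (by omega) le_rfl
      have hsnd : List.drop (lst.length - k * ℓ) lst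
          = (List.replicate k (List.drop (lst.length - ℓ) lst)).flatten :=
        (ih hfit').mpr fun m h2 hm => hall m h2 (by omega)
      rw [hfst, hsnd]


-- when k*ℓ does not fit, some trailing block is too short to equal the last block
theorem pvNoFit (lst : List String) (ℓ k : Nat) (h1 : 1 ≤ ℓ) (h2 : 2 * ℓ ≤ lst.length)
    (hk : lst.length < k * ℓ) :
    ∃ m, 2 ≤ m ∧ m ≤ k ∧ pvBlock lst m ℓ ≠ List.drop (lst.length - ℓ) lst := by
  refine ⟨lst.length / ℓ + 1, ?_, ?_, ?_⟩
  · have : 2 ≤ lst.length / ℓ := (Nat.le_div_iff_mul_le (by omega)).mpr (by omega)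
    omega
  · have : lst.length / ℓ < k := (Nat.div_lt_iff_lt_mul (by omega)).mpr hk
    omega
  · intro heq
    have hlen := congrArg List.length heq
    have hdiv := Nat.div_add_mod lst.length ℓ
    have hmod := Nat.mod_lt lst.length (show 0 < ℓ by omega)
    have hmul : (lst.length / ℓ + 1) * ℓ = lst.length / ℓ * ℓ + ℓ := Nat.succ_mul _ _
    have hcomm : lst.length / ℓ * ℓ = ℓ * (lst.length / ℓ) := Nat.mul_comm _ _
    unfold pvBlock at hlen
    simp only [Nat.add_sub_cancel, List.length_take, List.length_drop] at hlen
    omega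


theorem pvSlice_neg_neg (xs : List String) (a b : Nat) (ha : 0 < a) (hb : 0 < b) :
    PySem.List.slice xs (some (-(a : Int))) (some (-(b : Int))) =
      List.take ((xs.length - b) - (xs.length - a)) (List.drop (xs.length - a) xs) := by
  simp only [PySem.List.slice, PySem.List.clampIdx_neg_natCast xs.length a ha,
    PySem.List.clampIdx_neg_natCast xs.length b hb]

-- the per-candidate-length bodies of the two ports agree
theorem pvBody_eq (lst : List String) (t L : Int) (hL1 : 1 ≤ L)
    (hL2 : 2 * L ≤ (lst.length : Int)) :
    (decide (pvCountLoop
        (fun i => PySem.List.slice lst (some (-(i * L))) (some (-((i - 1) * L)))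
            == PySem.List.slice lst (some (-L)) none) t 2 1 ≥ t))
      = (decide (t * L ≤ (lst.length : Int)) &&
          (PySem.List.slice lst (some ((lst.length : Int) - t * L)) none ==
            PySem.List.pyRepeat (PySem.List.slice lst (some ((lst.length : Int) - L)) none) t)) := by
  set P : Int → Bool := fun i =>
    PySem.List.slice lst (some (-(i * L))) (some (-((i - 1) * L)))
      == PySem.List.slice lst (some (-L)) none with hP
  have hLl : L = ((L.toNat : Nat) : Int) := by omega
  set ℓ : Nat := L.toNat with hℓ
  have hℓ1 : 1 ≤ ℓ := by omega
  have hℓN : 2 * ℓ ≤ lst.length := by omega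
  have hseq : PySem.List.slice lst (some (-L)) none = List.drop (lst.length - ℓ) lst := by
    rw [show -L = -((ℓ : Nat) : Int) from by omega]
    exact PySem.List.slice_from_neg_natCast lst ℓ (by omega)
  by_cases ht2 : 2 ≤ t
  · -- main case
    set k : Nat := t.toNat with hkdef
    have ht : t = ((k : Nat) : Int) := by omega
    have hk2 : 2 ≤ k := by omega
    have htL : t * L = ((k * ℓ : Nat) : Int) := by rw [ht, hLl]; push_cast; ring
    have hA : (pvCountLoop P t 2 1 ≥ t) ↔ ∀ j, 2 ≤ j → j < t + 1 → P j = true := by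
      constructor
      · intro hge
        have hle := pvCountLoop_le P t 2 1 (by omega)
        have heq : pvCountLoop P t 2 1 = 1 + (t + 1 - 2) := by omega
        exact fun j h2 hj => (pvCountLoop_eq_iff P t 2 1 (by omega)).mp heq j h2 hj
      · intro h
        have := (pvCountLoop_eq_iff P t 2 1 (by omega)).mpr h
        omega
    have hblock : ∀ m : Nat, 2 ≤ m →
        (P (m : Int) = true ↔ pvBlock lst m ℓ = List.drop (lst.length - ℓ) lst) := by
      intro m hm
      rw [hP]
      simp only [beq_iff_eq]
      rw [hseq]
      rw [show -((m : Int) * L) = -(((m * ℓ : Nat)) : Int) from by rw [hLl]; push_cast; ring]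
      rw [show -(((m : Int) - 1) * L) = -((((m - 1) * ℓ : Nat)) : Int) from by
        rw [hLl]; push_cast [Nat.cast_sub (show 1 ≤ m by omega)]; ring]
      rw [pvSlice_neg_neg lst (m * ℓ) ((m - 1) * ℓ)
        (by positivity) (Nat.mul_pos (by omega) (by omega))]
      unfold pvBlock
      exact Iff.rfl
    have hforall : (∀ j : Int, 2 ≤ j → j < t + 1 → P j = true)
        ↔ (∀ m : Nat, 2 ≤ m → m ≤ k → pvBlock lst m ℓ = List.drop (lst.length - ℓ) lst) := by
      constructor
      · intro h m h2 hmk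
        exact (hblock m h2).mp (h (m : Int) (by omega) (by omega))
      · intro h j h2 hj
        rw [show j = ((j.toNat : Nat) : Int) from by omega]
        exact (hblock j.toNat (by omega)).mpr (h j.toNat (by omega) (by omega))
    by_cases hfit : k * ℓ ≤ lst.length
    · have hTail : PySem.List.slice lst (some ((lst.length : Int) - t * L)) none
          = List.drop (lst.length - k * ℓ) lst := by
        rw [PySem.List.slice_from lst (by omega : (0 : Int) ≤ (lst.length : Int) - t * L)]
        congr 1
        omega
      have hTail1 : PySem.List.slice lst (some ((lst.length : Int) - L)) none
          = List.drop (lst.length - ℓ) lst := by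
        rw [PySem.List.slice_from lst (by omega : (0 : Int) ≤ (lst.length : Int) - L)]
        congr 1
        omega
      have hRep : PySem.List.pyRepeat
            (PySem.List.slice lst (some ((lst.length : Int) - L)) none) t
          = (List.replicate k (List.drop (lst.length - ℓ) lst)).flatten := by
        rw [hTail1]
        simp only [PySem.List.pyRepeat, hkdef]
      rw [Bool.eq_iff_iff]
      simp only [decide_eq_true_eq, Bool.and_eq_true, beq_iff_eq, hTail, hRep]
      rw [hA, hforall, ← pvRep_iff lst ℓ hℓ1 (by omega) k (by omega) hfit]
      constructor
      · intro h; exact ⟨by omega, h⟩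
      · rintro ⟨-, h⟩; exact h
    · have hTL : ¬ (t * L ≤ (lst.length : Int)) := by omega
      rw [Bool.eq_iff_iff]
      simp only [decide_eq_true_eq, Bool.and_eq_true, beq_iff_eq]
      constructor
      · intro hge
        obtain ⟨m, h2, hmk, hne⟩ := pvNoFit lst ℓ k hℓ1 hℓN (by omega)
        exact absurd (hforall.mp (hA.mp hge) m h2 hmk) hne
      · rintro ⟨habs, -⟩
        exact absurd habs hTL
  · -- t ≤ 1: the inner loop never runs, count = 1, and both sides are true
    have hcount : pvCountLoop P t 2 1 = 1 := by
      rw [pvCountLoop, dif_neg (by omega : ¬ (2 : Int) < t + 1)]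
    by_cases ht1 : t = 1
    · subst ht1
      have hTail1 : PySem.List.slice lst (some ((lst.length : Int) - 1 * L)) none
          = List.drop (lst.length - ℓ) lst := by
        rw [one_mul, PySem.List.slice_from lst (by omega : (0 : Int) ≤ (lst.length : Int) - L)]
        congr 1
        omega
      have hTail2 : PySem.List.slice lst (some ((lst.length : Int) - L)) none
          = List.drop (lst.length - ℓ) lst := by
        rw [PySem.List.slice_from lst (by omega : (0 : Int) ≤ (lst.length : Int) - L)]
        congr 1
        omega
      have hRep : PySem.List.pyRepeat (List.drop (lst.length - ℓ) lst) (1 : Int)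
          = List.drop (lst.length - ℓ) lst := by
        simp [PySem.List.pyRepeat]
      rw [Bool.eq_iff_iff]
      simp only [hcount, hTail1, hTail2, hRep, decide_eq_true_eq, Bool.and_eq_true, beq_iff_eq]
      constructor
      · intro _; exact ⟨by omega, trivial⟩
      · intro _; omega
    · -- t ≤ 0: empty tail equals the block repeated a nonpositive number of times
      have ht0 : t ≤ 0 := by omega
      have htL0 : t * L ≤ 0 := by
        calc t * L ≤ 0 * L := by apply mul_le_mul_of_nonneg_right <;> omega
        _ = 0 := by ring
      have hTail : PySem.List.slice lst (some ((lst.length : Int) - t * L)) none = [] := by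
        rw [PySem.List.slice_from lst (by omega : (0 : Int) ≤ (lst.length : Int) - t * L)]
        exact List.drop_eq_nil_of_le (by omega)
      have hRep : PySem.List.pyRepeat
            (PySem.List.slice lst (some ((lst.length : Int) - L)) none) t = [] := by
        simp [PySem.List.pyRepeat, Int.toNat_of_nonpos ht0]
      rw [Bool.eq_iff_iff]
      simp only [hcount, hTail, hRep, decide_eq_true_eq, Bool.and_eq_true, beq_iff_eq]
      constructor
      · intro _; exact ⟨by omega, trivial⟩
      · intro _; omega


-- ===== VERDICT (by name: the statement is the Claim_ definition above) =====
theorem pvAny_congr {l : List Int} {f g : Int → Bool} (h : ∀ x ∈ l, f x = g x) :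
    l.any f = l.any g := by
  induction l with
  | nil => rfl
  | cons a l ih =>
      simp only [List.any_cons, h a (List.mem_cons_self), ih fun x hx => h x (List.mem_cons_of_mem a hx)]

theorem detect_duplicates_spec : Claim_equal_detect_duplicates := by
  intro lst t _
  unfold Spec_detect_duplicates detect_duplicates detect_duplicates_alt
  simp only []
  refine pvAny_congr ?_
  intro L hmem
  rw [PySem.List.mem_pyRange_one] at hmem
  simp only [PySem.List.len_eq, PySem.Int.floordiv_eq_ediv_of_pos (by norm_num : (0:Int) < 2)] at hmem
  exact pvBody_eq lst t L hmem.1 (by omega)
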